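-- pv_equiv track=rewrite | github.com/aryanf/WindowsRunTool | python/run.py | find_and_remove_debug
-- ===== SOURCE A (Python) =====
-- def find_and_remove_debug(input_list):
--     debug_flag = False
--     new_list = []
--     for item in input_list:
--         if item == '-debug':
--             debug_flag = True
--         else:
--             new_list.append(item)
--     return debug_flag, new_list
-- ===== SOURCE B (Python) =====
-- def find_and_remove_debug(input_list):
--     # Destructive-deletion approach: copy the list, repeatedly remove the
--     # sentinel in place until none is left, and derive the flag from the
--     # length change instead of tracking it during a scan.
--     new_list = list(input_list)
--     while '-debug' in new_list:
--         new_list.remove('-debug')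
--     return len(new_list) != len(input_list), new_list
-- ===== Notes on version B (the rewrite author's own statement) =====
-- stated objective: alternative
-- what changed: Replaces A's single scan that tracks a flag and appends non-sentinel items with a destructive-deletion scheme: copy the list, repeatedly call list.remove('-debug') until no sentinel remains, and compute the flag from the length change.
import Mathlib
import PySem

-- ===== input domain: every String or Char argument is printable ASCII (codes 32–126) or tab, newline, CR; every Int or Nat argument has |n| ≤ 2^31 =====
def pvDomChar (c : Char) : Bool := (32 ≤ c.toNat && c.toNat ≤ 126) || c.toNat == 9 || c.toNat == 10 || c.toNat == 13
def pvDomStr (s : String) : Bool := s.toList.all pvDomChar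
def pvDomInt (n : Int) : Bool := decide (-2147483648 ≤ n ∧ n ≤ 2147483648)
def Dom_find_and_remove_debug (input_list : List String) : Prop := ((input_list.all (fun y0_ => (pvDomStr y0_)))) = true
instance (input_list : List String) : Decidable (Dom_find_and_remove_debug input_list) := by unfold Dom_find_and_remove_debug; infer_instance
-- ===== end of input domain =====

-- B replaces A's single fused scan (flag + append accumulator) with destructive deletion:
-- repeatedly list.remove('-debug') on a copy until absent, flag from the length change; objective: alternative.


-- ===== PORT A =====
-- single loop maintaining (debug_flag, new_list)
def find_and_remove_debug (input_list : List String) : Bool × List String :=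
  let st := input_list.foldl
    (fun (st : Bool × List String) item =>
      if item == "-debug" then (true, st.2) else (st.1, st.2 ++ [item]))
    (false, [])
  (st.1, st.2)

-- ===== PORT B =====
-- termination measure for the while-loop: a successful remove shortens the list
lemma pvRemoveStep_lt (l : List String) (h : l.contains "-debug" = true) :
    ((PySem.List.remove? l "-debug").getD l).length < l.length := by
  have hm : "-debug" ∈ l := by simpa using h
  rw [PySem.List.remove?_eq_some_erase l "-debug" hm, Option.getD_some, List.length_erase,
    if_pos hm]
  have : 0 < l.length := List.length_pos_of_mem hm
  omega

-- the while-loop: remove '-debug' from new_list while it is present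
def pvRemoveLoop (new_list : List String) : List String :=
  if h : new_list.contains "-debug" then
    pvRemoveLoop ((PySem.List.remove? new_list "-debug").getD new_list)
  else new_list
termination_by new_list.length
decreasing_by exact pvRemoveStep_lt new_list h

-- copy, loop until absent, flag from the length change
def find_and_remove_debug_alt (input_list : List String) : Bool × List String :=
  let new_list := pvRemoveLoop input_list
  (new_list.length != input_list.length, new_list)

-- ===== PRECONDITION & SPEC =====
def Spec_find_and_remove_debug (input_list : List String) (out : Bool × List String) : Prop := out = find_and_remove_debug_alt input_list
instance (input_list : List String) (out : Bool × List String) : Decidable (Spec_find_and_remove_debug input_list out) := by unfold Spec_find_and_remove_debug; infer_instance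

-- ===== CLAIM (what is proved, stated in full; the proofs are below) =====
def Claim_equal_find_and_remove_debug : Prop := ∀ (input_list : List String), Dom_find_and_remove_debug input_list → Spec_find_and_remove_debug input_list (find_and_remove_debug input_list)

-- ===== LEMMAS AND PROOFS =====

-- erasing one '-debug' does not change the '-debug'-free filtrate
lemma erase_filter_debug (l : List String) :
    (l.erase "-debug").filter (fun x => x ≠ "-debug")
      = l.filter (fun x => x ≠ "-debug") := by
  induction l with
  | nil => simp
  | cons h t ih =>
    by_cases hh : h = "-debug"
    · subst hh; simp
    · rw [List.erase_cons_tail (by simpa using hh)]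
      simpa [hh] using ih

-- the while-loop computes the filtrate
lemma removeLoop_eq (l : List String) :
    pvRemoveLoop l = l.filter (fun x => x ≠ "-debug") := by
  induction hn : l.length using Nat.strong_induction_on generalizing l with
  | _ n ih =>
    rw [pvRemoveLoop]
    by_cases h : l.contains "-debug" = true
    · rw [dif_pos h]
      have hm : "-debug" ∈ l := by simpa using h
      rw [PySem.List.remove?_eq_some_erase l "-debug" hm, Option.getD_some]
      have hlt : (l.erase "-debug").length < n := by
        rw [List.length_erase, if_pos hm]
        have : 0 < l.length := List.length_pos_of_mem hm
        omega
      rw [ih _ hlt _ rfl, erase_filter_debug]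
    · rw [dif_neg h]
      have hnm : "-debug" ∉ l := by simpa using h
      refine (List.filter_eq_self.mpr ?_).symm
      intro x hx
      simp only [decide_eq_true_eq]
      rintro rfl
      exact hnm hx

-- the length-change flag equals membership of '-debug'
lemma flag_eq (l : List String) :
    ((l.filter (fun x => x ≠ "-debug")).length != l.length) = l.contains "-debug" := by
  by_cases h : "-debug" ∈ l
  · have hlt : (l.filter (fun x => x ≠ "-debug")).length < l.length := by
      refine List.length_filter_lt_length_iff_exists.mpr ⟨"-debug", h, by simp⟩
    simp [h, Nat.ne_of_lt hlt]
  · have hfe : l.filter (fun x => x ≠ "-debug") = l := by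
      refine List.filter_eq_self.mpr ?_
      intro x hx
      simp only [decide_eq_true_eq]
      rintro rfl
      exact h hx
    rw [hfe]
    simp [h]

-- loop invariant for A's fold from an arbitrary state (b, acc)
lemma fold_inv (l : List String) (b : Bool) (acc : List String) :
    l.foldl (fun (st : Bool × List String) item =>
      if item == "-debug" then (true, st.2) else (st.1, st.2 ++ [item])) (b, acc)
    = (b || l.contains "-debug", acc ++ l.filter (fun x => x ≠ "-debug")) := by
  induction l generalizing b acc with
  | nil => simp
  | cons h t ih =>
    rw [List.foldl_cons]
    by_cases hh : h = "-debug"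
    · subst hh
      simp only [BEq.rfl, if_true]
      rw [ih]
      simp
    · have hb : (h == "-debug") = false := beq_eq_false_iff_ne.mpr hh
      simp only [hb, Bool.false_eq_true, if_false]
      rw [ih]
      have hh' : ¬(("-debug" : String) = h) := fun he => hh he.symm
      simp [hh, hh', List.contains_cons]

-- ===== VERDICT (by name: the statement is the Claim_ definition above) =====
theorem find_and_remove_debug_spec : Claim_equal_find_and_remove_debug := by
  intro l _
  unfold Spec_find_and_remove_debug find_and_remove_debug find_and_remove_debug_alt
  rw [fold_inv, removeLoop_eq]
  simp only [Bool.false_or, List.nil_append]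
  rw [flag_eq]
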